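-- pv_equiv track=rewrite | github.com/weibin666/wb_algorithm | hw/二分/元素抗性判定.py | countSafeRunes
-- ===== SOURCE A (Python) =====
-- from bisect import bisect_left
-- from typing import List
--
-- def countSafeRunes(array1: List[int], array2: List[int], distance: int) -> int:
--     """
--     使用排序 + 二分查找优化判断过程。
--     """
--     # 先对 array2 排序，便于后续使用二分查找
--     array2.sort()
--     count = 0
--
--     for a in array1:
--         # 使用 bisect 在 array2 中找第一个 >= a - distance 的位置
--         left = bisect_left(array2, a - distance)
--
--         # 判断该位置及其之后的元素是否在干扰范围内
--         # 只要有一个元素在 [a - distance, a + distance] 区间内，说明不安全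
--         is_safe = True
--         if left < len(array2) and abs(array2[left] - a) <= distance:
--             is_safe = False
--
--         if is_safe:
--             count += 1
--
--     return count
-- ===== SOURCE B (Python) =====
-- from typing import List
--
-- def countSafeRunes(array1: List[int], array2: List[int], distance: int) -> int:
--     # One merge-style sweep: sort array2 in place (same mutation as A), walk
--     # sorted(array1) with a single monotone pointer into array2.
--     array2.sort()
--     n = len(array2)
--     count = 0
--     j = 0
--     for a in sorted(array1):
--         while j < n and array2[j] < a - distance:
--             j += 1
--         if j == n or array2[j] > a + distance:
--             count += 1
--     return count
-- ===== Notes on version B (the rewrite author's own statement) =====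
-- stated objective: alternative
-- what changed: Replaces the per-element binary search (sort array2, then bisect_left for every a in array1) by a single merge-style sweep: iterate over sorted(array1) and advance one monotone pointer into sorted array2, so each array2 element is passed at most once across all queries.
import Mathlib
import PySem

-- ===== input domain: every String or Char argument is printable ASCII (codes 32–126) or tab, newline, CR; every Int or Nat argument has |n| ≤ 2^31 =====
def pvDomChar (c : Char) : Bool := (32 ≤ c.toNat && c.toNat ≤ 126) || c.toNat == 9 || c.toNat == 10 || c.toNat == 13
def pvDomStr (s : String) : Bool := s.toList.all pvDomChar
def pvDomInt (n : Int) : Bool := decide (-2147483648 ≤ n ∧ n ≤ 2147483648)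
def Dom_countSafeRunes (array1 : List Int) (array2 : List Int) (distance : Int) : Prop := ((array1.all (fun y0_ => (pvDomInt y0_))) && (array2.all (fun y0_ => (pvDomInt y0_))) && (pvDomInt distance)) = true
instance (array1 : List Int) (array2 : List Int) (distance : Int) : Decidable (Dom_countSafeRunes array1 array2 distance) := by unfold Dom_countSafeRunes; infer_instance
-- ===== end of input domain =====

-- B replaces A's per-element bisect by one merge-style sweep with a monotone pointer
-- (alternative algorithm, same result).  Equivalence is about the RETURN value; both
-- programs additionally sort array2 in place identically.

-- ===== PORT A =====
-- A: sort array2, then for each a in array1 bisect_left for a - distance and test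
-- the found element; count the elements with no array2 element within distance.
def countSafeRunes (array1 : List Int) (array2 : List Int) (distance : Int) : Int :=
  let arr2 := PySem.List.sorted array2 (fun x => x) false
  array1.foldl (fun count a =>
    let left := PySem.List.bisectLeft arr2 (a - distance)
    let is_safe : Bool := true
    let is_safe : Bool :=
      if left < arr2.length ∧ |arr2.getD left 0 - a| ≤ distance then false else is_safe
    if is_safe then count + 1 else count) 0

-- ===== PORT B =====
-- B helper: while j < len(l) and l[j] < x: j += 1
def pvAdvance (l : List Int) (x : Int) (j : Nat) : Nat :=
  if j < l.length ∧ l.getD j 0 < x then pvAdvance l x (j + 1) else j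
termination_by l.length - j
decreasing_by omega

-- B helper: the sweep over the remaining (sorted) queries, carrying pointer j and count
def pvSweep (l : List Int) (d : Int) : List Int → Nat → Int → Int
  | [], _, c => c
  | a :: rest, j, c =>
    let j' := pvAdvance l (a - d) j
    pvSweep l d rest j' (if j' = l.length ∨ l.getD j' 0 > a + d then c + 1 else c)

def countSafeRunes_alt (array1 : List Int) (array2 : List Int) (distance : Int) : Int :=
  let arr2 := PySem.List.sorted array2 (fun x => x) false
  pvSweep arr2 distance (PySem.List.sorted array1 (fun x => x) false) 0 0

-- ===== PRECONDITION & SPEC =====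
def Spec_countSafeRunes (array1 : List Int) (array2 : List Int) (distance : Int) (out : Int) : Prop := out = countSafeRunes_alt array1 array2 distance
instance (array1 : List Int) (array2 : List Int) (distance : Int) (out : Int) : Decidable (Spec_countSafeRunes array1 array2 distance out) := by unfold Spec_countSafeRunes; infer_instance

-- ===== CLAIM (what is proved, stated in full; the proofs are below) =====
def Claim_equal_countSafeRunes : Prop := ∀ (array1 : List Int) (array2 : List Int) (distance : Int), Dom_countSafeRunes array1 array2 distance → Spec_countSafeRunes array1 array2 distance (countSafeRunes array1 array2 distance)

-- ===== LEMMAS AND PROOFS =====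

-- "a is unsafe": some element of l lies in [a-d, a+d]
def pvHit (l : List Int) (d a : Int) : Bool := l.any (fun b => decide (a - d ≤ b ∧ b ≤ a + d))

theorem pvHit_iff (l : List Int) (d a : Int) :
    pvHit l d a = true ↔ ∃ b ∈ l, a - d ≤ b ∧ b ≤ a + d := by
  simp [pvHit]

-- a pointer j that has skipped exactly a prefix of elements < a-d and stopped at the
-- first element ≥ a-d decides pvHit by the single test j < len ∧ l[j] ≤ a+d
theorem pvPointer_hit (l : List Int) (d a : Int) (j : Nat)
    (hs : l.Pairwise (· ≤ ·)) (hle : j ≤ l.length)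
    (hlt : ∀ k, k < j → l.getD k 0 < a - d)
    (hge : j < l.length → a - d ≤ l.getD j 0) :
    ((j < l.length ∧ l.getD j 0 ≤ a + d) ↔ pvHit l d a = true) := by
  rw [pvHit_iff]
  constructor
  · rintro ⟨hjl, hub⟩
    refine ⟨l.getD j 0, ?_, hge hjl, hub⟩
    rw [List.getD_eq_getElem l 0 hjl]
    exact List.getElem_mem hjl
  · rintro ⟨b, hb, hlb, hub⟩
    obtain ⟨k, hk, rfl⟩ := List.getElem_of_mem hb
    have hkj : j ≤ k := by
      by_contra h
      have := hlt k (by omega)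
      rw [List.getD_eq_getElem l 0 hk] at this
      omega
    have hjl : j < l.length := by omega
    refine ⟨hjl, ?_⟩
    have hmono : l.getD j 0 ≤ l[k] := by
      rw [List.getD_eq_getElem l 0 hjl]
      rcases Nat.eq_or_lt_of_le hkj with h | h
      · simp [h]
      · exact (List.pairwise_iff_getElem.mp hs) j k hjl hk h
    omega

-- A's per-element test equals pvHit (on a sorted l)
theorem pvBisect_hit (l : List Int) (d a : Int) (hs : l.Pairwise (· ≤ ·)) :
    ((PySem.List.bisectLeft l (a - d) < l.length ∧
      |l.getD (PySem.List.bisectLeft l (a - d)) 0 - a| ≤ d) ↔ pvHit l d a = true) := by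
  obtain ⟨h1, h2, h3⟩ := PySem.List.bisectLeft_spec l (a - d) hs
  set left := PySem.List.bisectLeft l (a - d) with hleft
  have hiff := pvPointer_hit l d a left hs h1
    (fun k hk => by
      rcases Nat.lt_or_ge k l.length with h | h
      · rw [List.getD_eq_getElem l 0 h]; exact h2 k h hk
      · omega)
    (fun h => by rw [List.getD_eq_getElem l 0 h]; exact h3 left h le_rfl)
  rw [← hiff]
  constructor
  · rintro ⟨hl, hab⟩
    rw [abs_le] at hab
    exact ⟨hl, by omega⟩
  · rintro ⟨hl, hub⟩
    have hge : a - d ≤ l.getD left 0 := by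
      rw [List.getD_eq_getElem l 0 hl]; exact h3 left hl le_rfl
    exact ⟨hl, by rw [abs_le]; omega⟩

-- characterisation of pvAdvance
theorem pvAdvance_spec (l : List Int) (x : Int) (j : Nat)
    (hle : j ≤ l.length) (hlt : ∀ k, k < j → l.getD k 0 < x) :
    j ≤ pvAdvance l x j ∧ pvAdvance l x j ≤ l.length ∧
    (∀ k, k < pvAdvance l x j → l.getD k 0 < x) ∧
    (pvAdvance l x j < l.length → ¬ l.getD (pvAdvance l x j) 0 < x) := by
  fun_induction pvAdvance l x j with
  | case1 j h ih =>
    have := ih (by omega) (fun k hk => by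
      rcases Nat.lt_or_ge k j with h' | h'
      · exact hlt k h'
      · have : k = j := by omega
        subst this; exact h.2)
    exact ⟨by omega, this.2.1, this.2.2.1, this.2.2.2⟩
  | case2 j h =>
    refine ⟨le_rfl, hle, hlt, fun hl hlt' => h ⟨hl, hlt'⟩⟩

-- A's fold counts the non-hits, from any accumulator
theorem pvFoldA (l : List Int) (d : Int) (hs : l.Pairwise (· ≤ ·)) :
    ∀ (as : List Int) (c : Int),
      as.foldl (fun count a =>
        let left := PySem.List.bisectLeft l (a - d)
        let is_safe : Bool := true
        let is_safe : Bool :=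
          if left < l.length ∧ |l.getD left 0 - a| ≤ d then false else is_safe
        if is_safe then count + 1 else count) c
      = c + (as.countP (fun a => !pvHit l d a) : Nat) := by
  intro as
  induction as with
  | nil => simp
  | cons a rest ih =>
    intro c
    simp only [List.foldl_cons, List.countP_cons]
    by_cases hcond : PySem.List.bisectLeft l (a - d) < l.length ∧
        |l.getD (PySem.List.bisectLeft l (a - d)) 0 - a| ≤ d
    · have h := (pvBisect_hit l d a hs).mp hcond
      rw [if_pos hcond, ih]
      simp [h]
    · have h : pvHit l d a = false := by
        rcases Bool.eq_false_or_eq_true (pvHit l d a) with h | h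
        · exact absurd ((pvBisect_hit l d a hs).mpr h) hcond
        · exact h
      rw [if_neg hcond, ih]
      simp [h]
      ring

-- B's sweep counts the non-hits: invariant on the carried pointer
theorem pvFoldB (l : List Int) (d : Int) (hs : l.Pairwise (· ≤ ·)) :
    ∀ (as : List Int), as.Pairwise (· ≤ ·) →
    ∀ (j : Nat) (c : Int), j ≤ l.length →
      (∀ k, k < j → ∀ a ∈ as, l.getD k 0 < a - d) →
      pvSweep l d as j c = c + (as.countP (fun a => !pvHit l d a) : Nat) := by
  intro as
  induction as with
  | nil => intro _ j c _ _; simp [pvSweep]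
  | cons a rest ih =>
    intro hp j c hjl hinv
    obtain ⟨hhead, hrest⟩ := List.pairwise_cons.mp hp
    obtain ⟨h1, h2, h3, h4⟩ := pvAdvance_spec l (a - d) j hjl
      (fun k hk => hinv k hk a (by simp))
    rw [pvSweep]
    set j' := pvAdvance l (a - d) j with hj'
    have hiff := pvPointer_hit l d a j' hs h2 h3 (fun h => by omega)
    rw [ih hrest j' _ h2 (fun k hk a' ha' => by
      have := h3 k hk
      have := hhead a' ha'
      omega)]
    rw [List.countP_cons]
    by_cases h : pvHit l d a = true
    · have hc := hiff.mpr h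
      have : ¬ (j' = l.length ∨ l.getD j' 0 > a + d) := by
        push Not
        refine ⟨by omega, by omega⟩
      rw [if_neg this]
      simp [h]
    · have hc : ¬ (j' < l.length ∧ l.getD j' 0 ≤ a + d) := fun hx => h (hiff.mp hx)
      have : (j' = l.length ∨ l.getD j' 0 > a + d) := by
        rcases Nat.lt_or_ge j' l.length with hl | hl
        · right
          by_contra hx
          exact hc ⟨hl, by omega⟩
        · left; omega
      rw [if_pos this]
      rw [Bool.not_eq_true] at h
      simp [h]
      ring

-- ===== VERDICT (by name: the statement is the Claim_ definition above) =====
theorem countSafeRunes_spec : Claim_equal_countSafeRunes := by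
  intro array1 array2 distance _
  unfold Spec_countSafeRunes countSafeRunes countSafeRunes_alt
  simp only
  set l := PySem.List.sorted array2 (fun x => x) false with hl
  have hs : l.Pairwise (· ≤ ·) := PySem.List.sorted_pairwise array2 (fun x => x)
  rw [pvFoldA l distance hs array1 0,
      pvFoldB l distance hs (PySem.List.sorted array1 (fun x => x) false)
        (PySem.List.sorted_pairwise array1 (fun x => x)) 0 0 (Nat.zero_le _)
        (fun k hk => by omega)]
  congr 2
  exact ((PySem.List.sorted_perm array1 (fun x => x) false).countP_eq _).symm
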